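-- pv_equiv track=rewrite | github.com/ImTheSquid/CubeMaze | cubeMaze.py | offset_from_edge
-- ===== SOURCE A (Python) =====
-- side_length = 8
--
-- x_leading_edge = [
--     [18], [24, 21, 16], [10], [7]
-- ]
--
-- x_trailing_edge = [
--     [20], [2, 11, 14], [8], [5]
-- ]
--
-- y_leading_edge = [
--     [1], [19, 22, 3, 4], [13]
-- ]
--
-- y_trailing_edge = [
--     [23], [17, 12, 9, 6], [15]
-- ]
--
-- def offset_from_edge(edge):
--     # Check each array for the edge
--     for i, edge_set in enumerate(x_leading_edge + x_trailing_edge):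
--         # Deals with trailing edge being on the other side
--         offset = 1 if i >= 4 else 0
--         if len(edge_set) == 1 and edge_set[0] == edge:
--             return (side_length * (i % 4 + offset) - offset, side_length, "x")
--         for j, edge_member in enumerate(edge_set):
--             if edge == edge_member:
--                 return (side_length * (i % 4 + offset) - offset, side_length * j, "x")
--
--     for i, edge_set in enumerate(y_leading_edge + y_trailing_edge):
--         # Deals with trailing edge being on the other side
--         offset = 1 if i >= 3 else 0
--         if len(edge_set) == 1 and edge_set[0] == edge:
--             return (side_length, side_length * (i % 3 + offset) - offset, "y")
--         for j, edge_member in enumerate(edge_set):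
--             if edge == edge_member:
--                 return (side_length * j, side_length * (i % 3 + offset) - offset, "y")
--
--     return None
-- ===== SOURCE B (Python) =====
-- side_length = 8
--
-- x_leading_edge = [
--     [18], [24, 21, 16], [10], [7]
-- ]
--
-- x_trailing_edge = [
--     [20], [2, 11, 14], [8], [5]
-- ]
--
-- y_leading_edge = [
--     [1], [19, 22, 3, 4], [13]
-- ]
--
-- y_trailing_edge = [
--     [23], [17, 12, 9, 6], [15]
-- ]
--
--
-- def _build_table():
--     table = {}
--     for i, edge_set in enumerate(x_leading_edge + x_trailing_edge):
--         offset = 1 if i >= 4 else 0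
--         x = side_length * (i % 4 + offset) - offset
--         for j, member in enumerate(edge_set):
--             y = side_length if len(edge_set) == 1 else side_length * j
--             table.setdefault(member, (x, y, "x"))
--     for i, edge_set in enumerate(y_leading_edge + y_trailing_edge):
--         offset = 1 if i >= 3 else 0
--         y = side_length * (i % 3 + offset) - offset
--         for j, member in enumerate(edge_set):
--             x = side_length if len(edge_set) == 1 else side_length * j
--             table.setdefault(member, (x, y, "y"))
--     return table
--
--
-- _EDGE_TABLE = _build_table()
--
--
-- def offset_from_edge(edge):
--     return _EDGE_TABLE.get(edge)
-- ===== Notes on version B (the rewrite author's own statement) =====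
-- stated objective: simpler
-- what changed: Replaces the two nested scans over the four edge tables on every call by a dict mapping each edge value to its precomputed (x, y, axis) tuple, built once at module load with setdefault to preserve first-match priority; the function body becomes a single dict lookup.
import Mathlib
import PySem

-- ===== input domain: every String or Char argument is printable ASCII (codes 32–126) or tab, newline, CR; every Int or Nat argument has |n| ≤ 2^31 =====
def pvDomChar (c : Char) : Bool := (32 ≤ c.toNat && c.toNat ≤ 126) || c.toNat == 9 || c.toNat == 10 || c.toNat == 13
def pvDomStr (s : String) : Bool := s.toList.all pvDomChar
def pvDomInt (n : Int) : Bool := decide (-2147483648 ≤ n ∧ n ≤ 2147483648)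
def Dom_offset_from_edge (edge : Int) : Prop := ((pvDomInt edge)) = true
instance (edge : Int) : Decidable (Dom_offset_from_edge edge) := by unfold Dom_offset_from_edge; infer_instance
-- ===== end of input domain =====

-- B replaces A's double scan of the four edge tables by a dict built once (same offset logic,
-- setdefault keeps first-match priority) and a single lookup; objective: simpler.

-- ===== PORT A =====
def pvSideLength : Int := 8
def pvXLeading : List (List Int) := [[18], [24, 21, 16], [10], [7]]
def pvXTrailing : List (List Int) := [[20], [2, 11, 14], [8], [5]]
def pvYLeading : List (List Int) := [[1], [19, 22, 3, 4], [13]]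
def pvYTrailing : List (List Int) := [[23], [17, 12, 9, 6], [15]]

-- inner 'for j, edge_member in enumerate(edge_set)' loop of A
def pvInnerFind (edge : Int) : List Int → Int → Option Int
  | [], _ => none
  | m :: rest, j => if edge = m then some j else pvInnerFind edge rest (j + 1)

-- first 'for i, edge_set in enumerate(...)' loop of A
def pvScanX (edge : Int) : List (List Int) → Int → Option (Int × Int × String)
  | [], _ => none
  | es :: rest, i =>
    let offset : Int := if i ≥ 4 then 1 else 0
    if es.length = 1 ∧ es.headD 0 = edge then
      some (pvSideLength * (i % 4 + offset) - offset, pvSideLength, "x")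
    else
      match pvInnerFind edge es 0 with
      | some j => some (pvSideLength * (i % 4 + offset) - offset, pvSideLength * j, "x")
      | none => pvScanX edge rest (i + 1)

-- second 'for i, edge_set in enumerate(...)' loop of A
def pvScanY (edge : Int) : List (List Int) → Int → Option (Int × Int × String)
  | [], _ => none
  | es :: rest, i =>
    let offset : Int := if i ≥ 3 then 1 else 0
    if es.length = 1 ∧ es.headD 0 = edge then
      some (pvSideLength, pvSideLength * (i % 3 + offset) - offset, "y")
    else
      match pvInnerFind edge es 0 with
      | some j => some (pvSideLength * j, pvSideLength * (i % 3 + offset) - offset, "y")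
      | none => pvScanY edge rest (i + 1)

def offset_from_edge (edge : Int) : Option (Int × Int × String) :=
  match pvScanX edge (pvXLeading ++ pvXTrailing) 0 with
  | some r => some r
  | none => pvScanY edge (pvYLeading ++ pvYTrailing) 0

-- ===== PORT B =====
-- _build_table: one pass over each group, setdefault preserves first-match priority
def pvTableX (d0 : PySem.Dict Int (Int × Int × String)) : PySem.Dict Int (Int × Int × String) :=
  ((PySem.List.enumerate (pvXLeading ++ pvXTrailing)).foldl (fun d (i, es) =>
    let offset : Int := if i ≥ 4 then 1 else 0
    let x := pvSideLength * (i % 4 + offset) - offset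
    (PySem.List.enumerate es).foldl (fun d (j, m) =>
      let y := if es.length = 1 then pvSideLength else pvSideLength * j
      d.setdefault m (x, y, "x")) d) d0)

def pvTableY (d0 : PySem.Dict Int (Int × Int × String)) : PySem.Dict Int (Int × Int × String) :=
  ((PySem.List.enumerate (pvYLeading ++ pvYTrailing)).foldl (fun d (i, es) =>
    let offset : Int := if i ≥ 3 then 1 else 0
    let y := pvSideLength * (i % 3 + offset) - offset
    (PySem.List.enumerate es).foldl (fun d (j, m) =>
      let x := if es.length = 1 then pvSideLength else pvSideLength * j
      d.setdefault m (x, y, "y")) d) d0)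

def pvEdgeTable : PySem.Dict Int (Int × Int × String) :=
  pvTableY (pvTableX PySem.Dict.empty)

def offset_from_edge_alt (edge : Int) : Option (Int × Int × String) :=
  pvEdgeTable.get? edge

-- ===== PRECONDITION & SPEC =====
def Spec_offset_from_edge (edge : Int) (out : Option (Int × Int × String)) : Prop := out = offset_from_edge_alt edge
instance (edge : Int) (out : Option (Int × Int × String)) : Decidable (Spec_offset_from_edge edge out) := by unfold Spec_offset_from_edge; infer_instance

-- ===== CLAIM (what is proved, stated in full; the proofs are below) =====
def Claim_equal_offset_from_edge : Prop := ∀ (edge : Int), Dom_offset_from_edge edge → Spec_offset_from_edge edge (offset_from_edge edge)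

-- ===== LEMMAS AND PROOFS =====

theorem innerFind_none (edge : Int) (l : List Int) (j : Int) (h : edge ∉ l) :
    pvInnerFind edge l j = none := by
  induction l generalizing j with
  | nil => rfl
  | cons m rest ih =>
    simp only [List.mem_cons, not_or] at h
    simp only [pvInnerFind, if_neg h.1]
    exact ih _ h.2

theorem scanX_none (edge : Int) (L : List (List Int)) (i : Int)
    (h : ∀ es ∈ L, edge ∉ es) : pvScanX edge L i = none := by
  induction L generalizing i with
  | nil => rfl
  | cons es rest ih =>
    have h1 : edge ∉ es := h es (List.mem_cons_self)
    have hc : ¬ (es.length = 1 ∧ es.headD 0 = edge) := by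
      rintro ⟨hl, hh⟩
      match es, hl with
      | [a], _ =>
        simp only [List.headD_cons] at hh
        exact h1 (hh ▸ List.mem_cons_self)
    simp only [pvScanX, if_neg hc, innerFind_none edge es 0 h1]
    exact ih _ (fun e he => h e (List.mem_cons_of_mem _ he))

theorem scanY_none (edge : Int) (L : List (List Int)) (i : Int)
    (h : ∀ es ∈ L, edge ∉ es) : pvScanY edge L i = none := by
  induction L generalizing i with
  | nil => rfl
  | cons es rest ih =>
    have h1 : edge ∉ es := h es (List.mem_cons_self)
    have hc : ¬ (es.length = 1 ∧ es.headD 0 = edge) := by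
      rintro ⟨hl, hh⟩
      match es, hl with
      | [a], _ =>
        simp only [List.headD_cons] at hh
        exact h1 (hh ▸ List.mem_cons_self)
    simp only [pvScanY, if_neg hc, innerFind_none edge es 0 h1]
    exact ih _ (fun e he => h e (List.mem_cons_of_mem _ he))

theorem offset_eq_of_far (edge : Int) (h : ¬ (-1 ≤ edge ∧ edge ≤ 25)) :
    offset_from_edge edge = offset_from_edge_alt edge := by
  have htab : pvEdgeTable = PySem.Dict.mk [((18 : Int), ((0 : Int), (8 : Int), "x")), ((24 : Int), ((8 : Int), (0 : Int), "x")), ((21 : Int), ((8 : Int), (8 : Int), "x")), ((16 : Int), ((8 : Int), (16 : Int), "x")), ((10 : Int), ((16 : Int), (8 : Int), "x")), ((7 : Int), ((24 : Int), (8 : Int), "x")), ((20 : Int), ((7 : Int), (8 : Int), "x")), ((2 : Int), ((15 : Int), (0 : Int), "x")), ((11 : Int), ((15 : Int), (8 : Int), "x")), ((14 : Int), ((15 : Int), (16 : Int), "x")), ((8 : Int), ((23 : Int), (8 : Int), "x")), ((5 : Int), ((31 : Int), (8 : Int), "x")), ((1 : Int), ((8 : Int), (0 : Int), "y")), ((19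 : Int), ((0 : Int), (8 : Int), "y")), ((22 : Int), ((8 : Int), (8 : Int), "y")), ((3 : Int), ((16 : Int), (8 : Int), "y")), ((4 : Int), ((24 : Int), (8 : Int), "y")), ((13 : Int), ((8 : Int), (16 : Int), "y")), ((23 : Int), ((8 : Int), (7 : Int), "y")), ((17 : Int), ((0 : Int), (15 : Int), "y")), ((12 : Int), ((8 : Int), (15 : Int), "y")), ((9 : Int), ((16 : Int), (15 : Int), "y")), ((6 : Int), ((24 : Int), (15 : Int), "y")), ((15 : Int), ((8 : Int), (23 : Int), "y"))] := by decide
  have hb : offset_from_edge_alt edge = none := by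
    unfold offset_from_edge_alt
    rw [htab, PySem.Dict.get?_eq_none_iff_not_mem_keys]
    simp only [PySem.Dict.keys_mk, List.map_cons, List.map_nil, List.mem_cons,
      List.not_mem_nil, or_false, not_or]
    omega
  have ha : offset_from_edge edge = none := by
    unfold offset_from_edge
    rw [scanX_none, scanY_none] <;>
      · intro es hes
        simp only [pvXLeading, pvXTrailing, pvYLeading, pvYTrailing,
          List.cons_append, List.nil_append] at hes
        fin_cases hes <;> simp <;> omega
  rw [ha, hb]

-- ===== VERDICT (by name: the statement is the Claim_ definition above) =====
theorem offset_from_edge_spec : Claim_equal_offset_from_edge := by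
  intro edge _
  unfold Spec_offset_from_edge
  by_cases h : -1 ≤ edge ∧ edge ≤ 25
  · obtain ⟨h1, h2⟩ := h
    interval_cases edge <;> decide
  · exact offset_eq_of_far edge h
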